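-- pv_equiv track=rewrite | github.com/an920107/programming | OJ/tmp/gen2.py | solve
-- ===== SOURCE A (Python) =====
-- def solve(l: list) -> list:
--     s = str(l[0])
--     result = []
--     dic = {}
--     lst = s.split(" ")
--     for elm in lst:
--         elm = elm.strip(".")
--         elm = elm.strip(",")
--         elm = elm.lower()
--         if elm in dic.keys():
--             dic[elm] += 1
--         else:
--             dic[elm] = 1
--     for elm in l[2:]:
--         if elm not in dic.keys():
--             result.append("0")
--         else:
--             result.append(str(dic[elm]))
--     return result
-- ===== SOURCE B (Python) =====
-- def solve(l: list) -> list: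
--     words = sorted(w.strip(".").strip(",").lower() for w in str(l[0]).split(" "))
--
--     def runs(ws):
--         # group the sorted tokens into (word, run-length) pairs
--         if not ws:
--             return []
--         w = ws[0]
--         i = 1
--         while i < len(ws) and ws[i] == w:
--             i += 1
--         return [(w, i)] + runs(ws[i:])
--
--     rle = runs(words)
--     return [str(sum(n for w, n in rle if w == q)) for q in l[2:]]
-- ===== Notes on version B (the rewrite author's own statement) =====
-- stated objective: alternative
-- what changed: B replaces A's hash-map counting with a sort-then-scan algorithm: it sorts the normalized tokens, run-length-encodes the sorted list into (word, count) groups by recursion, and answers each query by summing the lengths of its matching groups.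
-- outside the precondition, e.g. on solve([]): A raises IndexError, B raises IndexError
import Mathlib
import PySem

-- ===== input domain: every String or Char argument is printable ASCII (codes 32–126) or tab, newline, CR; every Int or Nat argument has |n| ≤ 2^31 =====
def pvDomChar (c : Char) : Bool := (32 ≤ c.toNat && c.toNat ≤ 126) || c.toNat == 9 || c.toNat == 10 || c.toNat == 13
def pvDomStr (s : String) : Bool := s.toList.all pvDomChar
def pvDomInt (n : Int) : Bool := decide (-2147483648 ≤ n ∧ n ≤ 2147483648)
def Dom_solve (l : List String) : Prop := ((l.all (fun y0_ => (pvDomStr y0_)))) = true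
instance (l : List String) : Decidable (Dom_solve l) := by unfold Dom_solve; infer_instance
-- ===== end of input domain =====

-- B replaces A's frequency dict by a sort-then-scan algorithm: sort the normalized tokens,
-- run-length-encode the sorted list into (word, count) groups, and answer each query by
-- summing the lengths of its matching groups.

-- ===== PORT A =====
def solve (l : List String) : List String :=
  match l with
  | [] => []   -- unreachable under Pre_solve (Python raises IndexError on l = [])
  | s :: _ =>
    -- split? with sep " " ≠ "" is always some; getD [] is exact here
    let lst := (PySem.Str.split? s " ").getD []
    let dic := lst.foldl (fun (dic : PySem.Dict String Int) elm =>
      let elm := PySem.Str.stripChars elm "."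
      let elm := PySem.Str.stripChars elm ","
      let elm := PySem.Str.lower elm
      if dic.contains elm then dic.modify elm 0 (· + 1)
      else dic.insert elm 1) PySem.Dict.empty
    (PySem.List.slice l (2 : Int)).foldl (fun result elm =>
      if ¬ dic.contains elm then result ++ ["0"]
      else result ++ [PySem.Int.toStr (dic.getD elm 0)]) []

-- ===== PORT B =====
def pvNorm (w : String) : String :=
  PySem.Str.lower (PySem.Str.stripChars (PySem.Str.stripChars w ".") ",")

-- Source B's inner 'runs': the while loop counts the leading run of ws[0] (i = 1 + length of the
-- leading block equal to ws[0]), then recurses on the remainder ws[i:].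
def pvRuns (ws : List String) : List (String × Int) :=
  match ws with
  | [] => []
  | x :: xs =>
    (x, (1 + (xs.takeWhile (· == x)).length : Int)) :: pvRuns (xs.dropWhile (· == x))
termination_by ws.length
decreasing_by
  simpa using Nat.lt_succ_of_le (List.length_dropWhile_le _ _)

def solve_alt (l : List String) : List String :=
  match l with
  | [] => []   -- unreachable under Pre_solve (Python raises IndexError on l = [])
  | s :: _ =>
    let words := PySem.List.sorted (((PySem.Str.split? s " ").getD []).map pvNorm) (fun x => x) false
    let rle := pvRuns words
    (PySem.List.slice l (2 : Int)).map (fun q =>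
      PySem.Int.toStr (((rle.filter (fun p => p.1 == q)).map Prod.snd).sum))

-- ===== PRECONDITION & SPEC =====
-- Pre_solve excludes only l = [], where the Python A raises IndexError on l[0] (B does too).
def Pre_solve (l : List String) : Prop := l ≠ []
instance (l : List String) : Decidable (Pre_solve l) := by unfold Pre_solve; infer_instance
def pvWitness_solve : List String := ["a b a", "2", "a", "b", "c"]
def Spec_solve (l : List String) (out : List String) : Prop := out = solve_alt l
instance (l : List String) (out : List String) : Decidable (Spec_solve l out) := by unfold Spec_solve; infer_instance

-- ===== CLAIM =====
def Claim_equal_solve : Prop := ∀ (l : List String), Dom_solve l → Pre_solve l → Spec_solve l (solve l)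

-- ===== LEMMAS AND PROOFS =====

-- One step of A's dict loop is exactly the Counter step on the normalized token.
theorem pv_step_eq (d : PySem.Dict String Int) (x : String) :
    (if d.contains (pvNorm x) then d.modify (pvNorm x) 0 (· + 1)
     else d.insert (pvNorm x) 1)
    = d.modify (pvNorm x) 0 (· + 1) := by
  by_cases h : d.contains (pvNorm x)
  · simp [h]
  · simp only [h, if_neg, Bool.false_eq_true, not_false_eq_true]
    have hn : d.get? (pvNorm x) = none :=
      (PySem.Dict.get?_eq_none_iff_contains d (pvNorm x)).mpr (by simpa using h)
    simp [PySem.Dict.modify, PySem.Dict.getD, hn]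

-- A's dict-building loop is exactly Counter over the normalized tokens.
theorem pv_dic_eq_counter (lst : List String) :
    lst.foldl (fun (dic : PySem.Dict String Int) elm =>
      let elm := PySem.Str.stripChars elm "."
      let elm := PySem.Str.stripChars elm ","
      let elm := PySem.Str.lower elm
      if dic.contains elm then dic.modify elm 0 (· + 1)
      else dic.insert elm 1) PySem.Dict.empty
    = PySem.Dict.counter (lst.map pvNorm) := by
  rw [PySem.Dict.counter_eq_foldl, List.foldl_map]
  apply PySem.List.foldl_congr_mem
  intro d x _
  simpa [pvNorm] using pv_step_eq d x

-- Summing the matching run lengths of the RLE recovers the count, for ANY list.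
theorem pv_runs_sum (ws : List String) (q : String) :
    (((pvRuns ws).filter (fun p => p.1 == q)).map Prod.snd).sum = (ws.count q : Int) := by
  match ws with
  | [] => simp [pvRuns]
  | x :: xs =>
    have ih := pv_runs_sum (xs.dropWhile (· == x)) q
    have hsplit : xs.takeWhile (· == x) ++ xs.dropWhile (· == x) = xs :=
      List.takeWhile_append_dropWhile
    have htcount : (xs.takeWhile (· == x)).count q =
        if q = x then (xs.takeWhile (· == x)).length else 0 := by
      by_cases hq : q = x
      · subst hq
        rw [if_pos rfl]
        refine List.count_eq_length.mpr (fun a ha => ?_)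
        have h2 := List.mem_takeWhile_imp ha
        simp only [beq_iff_eq] at h2
        exact h2.symm
      · simp only [if_neg hq]
        exact List.count_eq_zero.mpr
          (fun hmem => hq (by simpa using List.mem_takeWhile_imp hmem))
    have hxs : xs.count q =
        (xs.takeWhile (· == x)).count q + (xs.dropWhile (· == x)).count q := by
      conv_lhs => rw [← hsplit]
      rw [List.count_append]
    rw [pvRuns]
    by_cases hq : q = x
    · subst hq
      simp only [List.filter_cons, beq_self_eq_true, if_pos, List.map_cons, List.sum_cons, ih]
      rw [List.count_cons_self]
      rw [htcount, if_pos rfl] at hxs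
      rw [hxs]
      push_cast
      ring
    · have hb : (x == q) = false := beq_eq_false_iff_ne.mpr (fun h => hq h.symm)
      simp only [List.filter_cons, hb, Bool.false_eq_true, if_false]
      rw [ih]
      congr 1
      rw [List.count_cons, hb, hxs, htcount, if_neg hq]
      simp
termination_by ws.length
decreasing_by
  simpa using Nat.lt_succ_of_le (List.length_dropWhile_le _ _)

theorem solve_eq (l : List String) (h : Pre_solve l) : solve l = solve_alt l := by
  match l with
  | [] => exact absurd rfl h
  | s :: rest =>
    show solve (s :: rest) = solve_alt (s :: rest)
    unfold solve solve_alt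
    simp only [pv_dic_eq_counter]
    rw [show (fun (result : List String) elm =>
          if ¬ (PySem.Dict.counter (((PySem.Str.split? s " ").getD []).map pvNorm)).contains elm
          then result ++ ["0"]
          else result ++ [PySem.Int.toStr
            ((PySem.Dict.counter (((PySem.Str.split? s " ").getD []).map pvNorm)).getD elm 0)])
        = (fun result elm => result ++
            [if ¬ (PySem.Dict.counter (((PySem.Str.split? s " ").getD []).map pvNorm)).contains elm
             then "0"
             else PySem.Int.toStr
               ((PySem.Dict.counter (((PySem.Str.split? s " ").getD []).map pvNorm)).getD elm 0)])
        from by funext result elm; by_cases hc :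
          (PySem.Dict.counter (((PySem.Str.split? s " ").getD []).map pvNorm)).contains elm <;> simp [hc]]
    rw [PySem.List.foldl_append_singleton_eq_map]
    simp only [List.nil_append]
    apply List.map_congr_left
    intro q _
    have hperm : (PySem.List.sorted (((PySem.Str.split? s " ").getD []).map pvNorm)
        (fun x => x) false).Perm (((PySem.Str.split? s " ").getD []).map pvNorm) :=
      PySem.List.sorted_perm _ _ _
    rw [pv_runs_sum, hperm.count_eq]
    by_cases hc : (PySem.Dict.counter (((PySem.Str.split? s " ").getD []).map pvNorm)).contains q
    · simp [hc, PySem.Dict.getD_counter]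
    · have h0 : (((PySem.Str.split? s " ").getD []).map pvNorm).count q = 0 := by
        rw [PySem.Dict.contains_counter] at hc
        simpa [List.count_eq_zero] using hc
      simp [hc, h0]
      rfl

-- ===== VERDICT =====
theorem solve_spec : Claim_equal_solve := by
  intro l _ hp
  exact solve_eq l hp
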